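-- pv_equiv track=rewrite | github.com/mohammad-rowshan/directional_qLDPC_codes | dir_codes_numerics.py | delta_odd_set
-- ===== SOURCE A (Python) =====
-- from typing import Dict, Iterable, List, Optional, Sequence, Tuple
--
-- def delta_odd_set(offsets: Sequence[Tuple[int, int]]) -> List[Tuple[int, int]]:
--     """
--     Δ_odd(W) = {v : multiplicity of v among pairwise differences Q_j-Q_i (i<j) is odd}.
--     Returns a (not-necessarily-minimal) generator set; v=(0,0) omitted.
--     """
--     mu: Dict[Tuple[int, int], int] = {}
--     m = len(offsets)
--     for i in range(m):
--         xi, yi = offsets[i]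
--         for j in range(i + 1, m):
--             xj, yj = offsets[j]
--             v = (xj - xi, yj - yi)
--             mu[v] = mu.get(v, 0) ^ 1
--     return [v for (v, parity) in mu.items() if parity == 1 and v != (0, 0)]
-- ===== SOURCE B (Python) =====
-- def delta_odd_set(offsets):
--     # Recursively peel off the first point: its differences to the rest, then recurse.
--     def pair_diffs(pts):
--         if len(pts) < 2:
--             return []
--         (x0, y0) = pts[0]
--         rest = pts[1:]
--         return [(x - x0, y - y0) for (x, y) in rest] + pair_diffs(rest)
--
--     diffs = pair_diffs(list(offsets))
--     # order-preserving dedup, no dict/Counter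
--     seen = []
--     for v in diffs:
--         if v not in seen:
--             seen.append(v)
--     # per-key multiplicity by scanning the flat list
--     return [v for v in seen if v != (0, 0) and diffs.count(v) % 2 == 1]
-- ===== Notes on version B (the rewrite author's own statement) =====
-- stated objective: alternative
-- what changed: B replaces A's index loops with online XOR-parity dict by a recursive head-peeling generation of the difference list, an order-preserving dedup list (no hash map at all), and a per-key multiplicity scan with list.count whose parity decides membership.
import Mathlib
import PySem

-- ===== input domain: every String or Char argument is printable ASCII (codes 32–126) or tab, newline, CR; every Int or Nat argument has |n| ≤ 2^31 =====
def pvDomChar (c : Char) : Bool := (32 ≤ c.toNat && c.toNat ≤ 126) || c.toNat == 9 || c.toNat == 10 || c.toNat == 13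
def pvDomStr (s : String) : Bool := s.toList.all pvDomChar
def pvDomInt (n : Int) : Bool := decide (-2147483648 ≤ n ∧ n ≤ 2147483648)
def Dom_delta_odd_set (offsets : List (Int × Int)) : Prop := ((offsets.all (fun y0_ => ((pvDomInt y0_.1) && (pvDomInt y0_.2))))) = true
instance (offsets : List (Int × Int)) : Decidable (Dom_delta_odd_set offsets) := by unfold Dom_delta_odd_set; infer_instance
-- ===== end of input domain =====

-- B generates the difference list by recursive head-peeling, dedups with an order-preserving list (no dict), and keeps entries whose scanned multiplicity is odd; same result, same order (alternative decomposition, no speed claim).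

-- ===== PORT A =====
def delta_odd_set (offsets : List (Int × Int)) : List (Int × Int) :=
  let m : Int := PySem.List.len offsets
  let mu : PySem.Dict (Int × Int) Int :=
    (PySem.List.pyRange 0 m 1).foldl (fun mu i =>
      -- xi, yi = offsets[i]; i produced by range(m) is always in range, so pyGetD is exact
      let p := PySem.List.pyGetD offsets i ((0 : Int), (0 : Int))
      (PySem.List.pyRange (i + 1) m 1).foldl (fun mu j =>
        let q := PySem.List.pyGetD offsets j ((0 : Int), (0 : Int))
        let v : Int × Int := (q.1 - p.1, q.2 - p.2)
        mu.insert v (PySem.Int.bxor (mu.getD v 0) 1)) mu) PySem.Dict.empty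
  (mu.items.filter (fun p => p.2 == 1 && !(p.1 == ((0 : Int), (0 : Int))))).map (·.1)

-- ===== PORT B =====
-- pair_diffs: recursion peeling the head point (len < 2 → [])
def pairDiffs : List (Int × Int) → List (Int × Int)
  | [] => []
  | [_] => []
  | p :: rest => rest.map (fun q => (q.1 - p.1, q.2 - p.2)) ++ pairDiffs rest

def delta_odd_set_alt (offsets : List (Int × Int)) : List (Int × Int) :=
  let diffs := pairDiffs offsets
  -- seen = []; for v in diffs: if v not in seen: seen.append(v)
  let seen : List (Int × Int) :=
    diffs.foldl (fun seen v => if seen.contains v then seen else seen ++ [v]) []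
  seen.filter (fun v =>
    !(v == ((0 : Int), (0 : Int))) &&
      (PySem.Int.mod ((PySem.List.count diffs v : Nat) : Int) 2 == 1))

-- ===== PRECONDITION & SPEC =====
def Spec_delta_odd_set (offsets : List (Int × Int)) (out : List (Int × Int)) : Prop := out = delta_odd_set_alt offsets
instance (offsets : List (Int × Int)) (out : List (Int × Int)) : Decidable (Spec_delta_odd_set offsets out) := by unfold Spec_delta_odd_set; infer_instance

-- ===== CLAIM (what is proved, stated in full; the proofs are below) =====
def Claim_equal_delta_odd_set : Prop := ∀ (offsets : List (Int × Int)), Dom_delta_odd_set offsets → Spec_delta_odd_set offsets (delta_odd_set offsets)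

-- ===== LEMMAS AND PROOFS =====

-- A's toggle step and the flat difference list in A's index form, named for the proofs
def pvToggle (d : PySem.Dict (Int × Int) Int) (x : Int × Int) : PySem.Dict (Int × Int) Int :=
  d.insert x (PySem.Int.bxor (d.getD x 0) 1)

def pvDiffs (offsets : List (Int × Int)) : List (Int × Int) :=
  (PySem.List.pyRange 0 (PySem.List.len offsets) 1).flatMap (fun i =>
    (PySem.List.slice offsets (some (i + 1)) none).map
      (fun q => (q.1 - (PySem.List.pyGetD offsets i ((0 : Int), (0 : Int))).1,
                 q.2 - (PySem.List.pyGetD offsets i ((0 : Int), (0 : Int))).2)))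

theorem pvDiffs_nil : pvDiffs [] = [] := by
  simp [pvDiffs]

theorem pvDiffs_cons (p : Int × Int) (rest : List (Int × Int)) :
    pvDiffs (p :: rest) = rest.map (fun q => (q.1 - p.1, q.2 - p.2)) ++ pvDiffs rest := by
  unfold pvDiffs
  have h1 : PySem.List.len (p :: rest) = ((rest.length + 1 : Nat) : Int) := by simp
  have h2 : PySem.List.len rest = ((rest.length : Nat) : Int) := by simp
  rw [h1, h2, PySem.List.pyRange_zero_natCast, PySem.List.pyRange_zero_natCast,
      List.range_succ_eq_map, List.map_cons, List.flatMap_cons]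
  congr 1
  · norm_num
    rw [PySem.List.slice_from_one]
    simp
  · rw [List.map_map, List.flatMap_map, List.flatMap_map]
    apply List.flatMap_congr
    intro k _
    have e1 : ((Nat.succ k : Nat) : Int) + 1 = ((k + 2 : Nat) : Int) := by push_cast; ring_nf
    have e2 : ((k : Nat) : Int) + 1 = ((k + 1 : Nat) : Int) := by push_cast; ring
    rw [Function.comp_apply, e1, e2, PySem.List.slice_from_natCast, PySem.List.slice_from_natCast,
        show ((Nat.succ k : Nat) : Int) = ((k + 1 : Nat) : Int) from by push_cast; ring,
        PySem.List.pyGetD_natCast, PySem.List.pyGetD_natCast]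
    simp

-- B's recursive generator produces exactly A's flat difference list
theorem pairDiffs_eq (offsets : List (Int × Int)) : pairDiffs offsets = pvDiffs offsets := by
  induction offsets with
  | nil => rw [pvDiffs_nil]; rfl
  | cons p rest ih =>
    rw [pvDiffs_cons, ← ih]
    cases rest with
    | nil => rfl
    | cons q l => rfl

-- B's dedup loop is PySem.Set.ofList (first occurrences, in order)
theorem seen_eq (l : List (Int × Int)) :
    l.foldl (fun seen v => if seen.contains v then seen else seen ++ [v]) [] = PySem.Set.ofList l := by
  rw [PySem.Set.ofList_eq_foldl]
  rfl

-- A's nested index loop is the XOR-toggle fold over the flat difference list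
theorem a_fold_eq (offsets : List (Int × Int)) :
    (PySem.List.pyRange 0 (PySem.List.len offsets) 1).foldl (fun mu i =>
      (PySem.List.pyRange (i + 1) (PySem.List.len offsets) 1).foldl (fun mu j =>
        let q := PySem.List.pyGetD offsets j ((0 : Int), (0 : Int))
        let v : Int × Int := (q.1 - (PySem.List.pyGetD offsets i ((0 : Int), (0 : Int))).1,
                              q.2 - (PySem.List.pyGetD offsets i ((0 : Int), (0 : Int))).2)
        mu.insert v (PySem.Int.bxor (mu.getD v 0) 1)) mu) PySem.Dict.empty
      = (pvDiffs offsets).foldl pvToggle PySem.Dict.empty := by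
  rw [pvDiffs, List.foldl_flatMap]
  apply PySem.List.foldl_congr_mem
  intro acc i hi
  have h0i : 0 ≤ i := (PySem.List.mem_pyRange_one.mp hi).1
  have hcast : i + 1 = ((i.toNat + 1 : Nat) : Int) := by omega
  rw [List.foldl_map, hcast, PySem.List.slice_from_natCast]
  have := PySem.List.foldl_pyRange_pyGetD offsets ((0 : Int), (0 : Int))
    (fun acc q => pvToggle acc (q.1 - (PySem.List.pyGetD offsets i ((0 : Int), (0 : Int))).1,
                                q.2 - (PySem.List.pyGetD offsets i ((0 : Int), (0 : Int))).2))
    acc (a := i + 1) (by omega)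
  rw [hcast] at this
  have hdrop : (max i 0 + 1).toNat = i.toNat + 1 := by omega
  simpa [pvToggle, hdrop] using this

-- the XOR-toggle fold stores the parity of the running count
theorem toggle_getD (l : List (Int × Int)) :
    ∀ (d : PySem.Dict (Int × Int) Int) (v : Int × Int),
      (∀ w, d.getD w 0 = 0 ∨ d.getD w 0 = 1) →
      (l.foldl pvToggle d).getD v 0 =
        if ((d.getD v 0).toNat + l.count v) % 2 = 1 then 1 else 0 := by
  induction l with
  | nil =>
    intro d v h
    rcases h v with hv | hv <;> simp [hv]
  | cons x l ih =>
    intro d v h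
    have hstep : ∀ w, (pvToggle d x).getD w 0 = 0 ∨ (pvToggle d x).getD w 0 = 1 := by
      intro w
      rw [pvToggle, PySem.Dict.getD_insert]
      split_ifs
      · rcases h x with hx | hx <;> rw [hx]
        · right; decide
        · left; decide
      · exact h w
    rw [List.foldl_cons, ih _ v hstep, List.count_cons]
    rw [pvToggle, PySem.Dict.getD_insert]
    by_cases hvx : v = x
    · rcases h x with hx | hx <;>
        · simp only [hvx, hx, show PySem.Int.bxor 0 1 = 1 from by decide,
            show PySem.Int.bxor 1 1 = 0 from by decide, beq_self_eq_true, if_pos]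
          split_ifs <;> omega
    · simp [hvx, (Ne.symm hvx : x ≠ v)]

-- parity of the final dict entry = parity of the count in pvDiffs
theorem fold_getD (offsets : List (Int × Int)) (v : Int × Int) :
    ((pvDiffs offsets).foldl pvToggle PySem.Dict.empty).getD v 0 =
      if (pvDiffs offsets).count v % 2 = 1 then 1 else 0 := by
  rw [toggle_getD _ _ _ (fun w => Or.inl (PySem.Dict.getD_empty _ _))]
  simp

theorem fold_keys (offsets : List (Int × Int)) :
    ((pvDiffs offsets).foldl pvToggle PySem.Dict.empty).keys = PySem.Set.ofList (pvDiffs offsets) := by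
  have := PySem.Dict.keys_foldl_insert (pvDiffs offsets)
    (fun d x => PySem.Int.bxor (d.getD x 0) 1) PySem.Dict.empty
  simpa [pvToggle] using this

theorem fold_nodup (offsets : List (Int × Int)) :
    ((pvDiffs offsets).foldl pvToggle PySem.Dict.empty).keys.Nodup := by
  have := PySem.Dict.nodup_keys_foldl_insert (pvDiffs offsets)
    (fun d x => PySem.Int.bxor (d.getD x 0) 1) PySem.Dict.empty (by simp)
  simpa [pvToggle] using this

-- ===== VERDICT (by name: the statement is the Claim_ definition above) =====
theorem delta_odd_set_spec : Claim_equal_delta_odd_set := by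
  intro offsets _
  unfold Spec_delta_odd_set delta_odd_set delta_odd_set_alt
  simp only [pairDiffs_eq, seen_eq, a_fold_eq]
  rw [PySem.Dict.items_eq_map_keys _ (fold_nodup offsets) 0, fold_keys,
    List.filter_map, List.map_map,
    show ((fun x : (Int × Int) × Int => x.1) ∘ fun k : Int × Int =>
      (k, (List.foldl pvToggle PySem.Dict.empty (pvDiffs offsets)).getD k 0)) = (fun k => k) from rfl,
    List.map_id']
  apply List.filter_congr
  intro k _
  simp only [Function.comp_apply, fold_getD, PySem.List.count_eq]
  have h2 : PySem.Int.mod (((pvDiffs offsets).count k : Nat) : Int) 2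
      = (((pvDiffs offsets).count k % 2 : Nat) : Int) := by
    exact_mod_cast PySem.Int.mod_natCast ((pvDiffs offsets).count k) 2
  rw [h2]
  rcases Nat.mod_two_eq_zero_or_one ((pvDiffs offsets).count k) with h | h <;>
    simp [h, Bool.and_comm]
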